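-- pv_equiv track=rewrite | github.com/cjotasM/Nuevas-tecnolog-as-Marlon | punto1.py | generar_serie
-- ===== SOURCE A (Python) =====
-- def generar_serie(n):
--     serie = []
--     a, b = 5, 8  # Los dos primeros números de la serie
--
--     for _ in range(n):
--         if a != 13:  # Omitir el número 13
--             serie.append(a)
--         a, b = b, a + b  # Generar el siguiente número en la serie
--
--     return serie
-- ===== SOURCE B (Python) =====
-- def generar_serie(n):
--     # Closed-form per index: term k is Fibonacci(k+5) (5=F5, 8=F6), computed by
--     # fast doubling; 13 = F7 occurs only at index 2, so skip by INDEX, not value.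
--     def fib_pair(k):  # returns (F(k), F(k+1)) by fast doubling
--         if k == 0:
--             return (0, 1)
--         f, g = fib_pair(k // 2)
--         c = f * (2 * g - f)
--         d = f * f + g * g
--         if k % 2 == 0:
--             return (c, d)
--         return (d, c + d)
--     return [fib_pair(k + 5)[0] for k in range(n) if k != 2]
-- ===== Notes on version B (the rewrite author's own statement) =====
-- stated objective: alternative
-- what changed: B replaces A's stateful recurrence loop by a closed-form per-index computation: term k is Fibonacci(k+5), computed independently for each index by recursive fast doubling, and 13 (= F7) is omitted by skipping index 2 rather than testing the value.
import Mathlib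
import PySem

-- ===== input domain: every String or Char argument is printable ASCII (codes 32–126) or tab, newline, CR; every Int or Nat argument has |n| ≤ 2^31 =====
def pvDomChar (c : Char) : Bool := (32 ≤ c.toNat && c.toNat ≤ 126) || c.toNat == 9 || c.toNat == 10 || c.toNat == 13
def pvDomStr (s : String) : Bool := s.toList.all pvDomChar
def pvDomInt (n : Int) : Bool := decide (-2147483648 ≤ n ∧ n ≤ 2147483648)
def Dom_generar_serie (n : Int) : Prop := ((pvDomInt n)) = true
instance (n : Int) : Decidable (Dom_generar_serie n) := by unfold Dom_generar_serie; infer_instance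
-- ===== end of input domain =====

-- B replaces A's stateful loop by a closed-form per-index method: term k = Fib(k+5) via fast doubling, skipping index 2 (where 13 = F7 sits) — alternative algorithm, same order of cost.


-- ===== PORT A =====
-- for _ in range(n): if a != 13: serie.append(a); a, b = b, a + b
def generar_serie (n : Int) : List Int :=
  ((PySem.List.pyRange 0 n 1).foldl
    (fun (st : List Int × Int × Int) _ =>
      ((if st.2.1 ≠ 13 then st.1 ++ [st.2.1] else st.1), st.2.2, st.2.1 + st.2.2))
    ([], 5, 8)).1

-- ===== PORT B =====
-- fib_pair(k) = (F(k), F(k+1)) by fast doubling; only called with k ≥ 5, so the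
-- Nat argument (via .toNat below) matches Python's int exactly on every call made.
def fibPair : Nat → Int × Int
  | 0 => (0, 1)
  | k + 1 =>
    let p := fibPair ((k + 1) / 2)
    let f := p.1
    let g := p.2
    let c := f * (2 * g - f)
    let d := f * f + g * g
    if (k + 1) % 2 == 0 then (c, d) else (d, c + d)
decreasing_by omega

-- [fib_pair(k + 5)[0] for k in range(n) if k != 2]
def generar_serie_alt (n : Int) : List Int :=
  ((PySem.List.pyRange 0 n 1).filter (fun k => k ≠ 2)).map
    (fun k => (fibPair (k + 5).toNat).1)

-- ===== PRECONDITION & SPEC =====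
def Spec_generar_serie (n : Int) (out : List Int) : Prop := out = generar_serie_alt n
instance (n : Int) (out : List Int) : Decidable (Spec_generar_serie n out) := by unfold Spec_generar_serie; infer_instance

-- ===== CLAIM (what is proved, stated in full; the proofs are below) =====
def Claim_equal_generar_serie : Prop := ∀ (n : Int), Dom_generar_serie n → Spec_generar_serie n (generar_serie n)

-- ===== LEMMAS AND PROOFS =====

-- fast doubling computes Fibonacci
theorem fibPair_eq (k : Nat) : fibPair k = ((Nat.fib k : Int), (Nat.fib (k + 1) : Int)) := by
  induction k using Nat.strong_induction_on with
  | _ k ih =>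
    match k with
    | 0 => simp [fibPair]
    | k + 1 =>
      have hlt : (k + 1) / 2 < k + 1 := by omega
      rw [fibPair, ih _ hlt]
      have hle : Nat.fib ((k + 1) / 2) ≤ 2 * Nat.fib ((k + 1) / 2 + 1) :=
        le_trans (Nat.fib_le_fib_succ) (by omega)
      have hc : ((Nat.fib ((k+1)/2) : Int)) * (2 * (Nat.fib ((k+1)/2 + 1) : Int) - (Nat.fib ((k+1)/2) : Int))
          = (Nat.fib (2 * ((k+1)/2)) : Int) := by
        rw [Nat.fib_two_mul]; push_cast [hle]; ring
      have hd : ((Nat.fib ((k+1)/2) : Int)) * (Nat.fib ((k+1)/2) : Int)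
            + (Nat.fib ((k+1)/2 + 1) : Int) * (Nat.fib ((k+1)/2 + 1) : Int)
          = (Nat.fib (2 * ((k+1)/2) + 1) : Int) := by
        rw [Nat.fib_two_mul_add_one]; push_cast; ring
      by_cases hpar : (k + 1) % 2 = 0
      · have h2 : 2 * ((k + 1) / 2) = k + 1 := by omega
        simp only [hpar, beq_self_eq_true, if_true]
        rw [h2] at hc hd
        simp [hc, hd]
      · have h2 : 2 * ((k + 1) / 2) = k := by omega
        have : ((k + 1) % 2 == 0) = false := by simp [hpar]
        simp only [this, Bool.false_eq_true, if_false]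
        rw [h2] at hc hd
        refine Prod.ext (by simpa using hd) ?_
        have := Nat.fib_add_two (n := k)
        simp only [hc, hd]
        push_cast [this]
        ring

-- the k-th term of A's recurrence from (5, 8) = (F5, F6) is Fib(k+5)
theorem fib_ne_13 (m : Nat) (hm : m ≠ 2) : (Nat.fib (m + 5) : Int) ≠ 13 := by
  match m with
  | 0 => decide
  | 1 => decide
  | 2 => omega
  | (j + 3) =>
    have h21 : Nat.fib 8 ≤ Nat.fib (j + 3 + 5) := Nat.fib_mono (by omega)
    have : (21 : Nat) ≤ Nat.fib (j + 3 + 5) := by simpa [Nat.fib] using h21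
    intro h
    omega

-- main loop invariant: A's fold over range(0, m) produces B's list, with the
-- Fibonacci state carried along
theorem foldA_eq (m : Nat) :
    ((PySem.List.pyRange 0 (m : Int) 1).foldl
      (fun (st : List Int × Int × Int) _ =>
        ((if st.2.1 ≠ 13 then st.1 ++ [st.2.1] else st.1), st.2.2, st.2.1 + st.2.2))
      ([], 5, 8))
    = (((PySem.List.pyRange 0 (m : Int) 1).filter (fun k => k ≠ 2)).map
          (fun k => (fibPair (k + 5).toNat).1),
        (Nat.fib (m + 5) : Int), (Nat.fib (m + 6) : Int)) := by
  induction m with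
  | zero =>
    rw [PySem.List.pyRange_one_eq_nil (by norm_num)]
    norm_num [Nat.fib]
  | succ m ih =>
    have hsplit : PySem.List.pyRange 0 (((m : Nat) + 1 : Nat) : Int) 1
        = PySem.List.pyRange 0 (m : Int) 1 ++ [(m : Int)] := by
      push_cast
      exact PySem.List.pyRange_one_succ_right (by positivity)
    rw [hsplit, List.foldl_append, ih, List.filter_append, List.map_append]
    simp only [List.foldl_cons, List.foldl_nil, List.filter_cons, List.filter_nil]
    have hfib : (Nat.fib (m + 5) : Int) + (Nat.fib (m + 6) : Int) = (Nat.fib (m + 7) : Int) := by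
      have := Nat.fib_add_two (n := m + 5); push_cast [this]; ring
    have hidx5 : m + 1 + 5 = m + 6 := by omega
    have hidx6 : m + 1 + 6 = m + 7 := by omega
    rw [hidx5, hidx6]
    by_cases hm : m = 2
    · subst hm
      have h13 : (Nat.fib 7 : Int) = 13 := by norm_num [Nat.fib]
      have h2 : ¬ ((2 : Int) ≠ 2) := by norm_num
      simp [h13, h2]
      norm_num [Nat.fib]
    · have hne : (Nat.fib (m + 5) : Int) ≠ 13 := fib_ne_13 m hm
      have hkne : ((m : Int) ≠ 2) := by
        intro h; exact hm (by exact_mod_cast h)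
      have hfp : (fibPair ((m : Int) + 5).toNat).1 = (Nat.fib (m + 5) : Int) := by
        have h' : ((m : Int) + 5).toNat = m + 5 := by omega
        rw [h', fibPair_eq]
      simp [hne, hkne, hfp, hfib]

-- for negative n the range is empty on both sides
theorem pyRange_toNat (n : Int) :
    PySem.List.pyRange 0 n 1 = PySem.List.pyRange 0 (n.toNat : Int) 1 := by
  by_cases h : n ≤ 0
  · rw [PySem.List.pyRange_one_eq_nil h, PySem.List.pyRange_one_eq_nil (by omega)]
  · congr 1; omega

-- ===== VERDICT (by name: the statement is the Claim_ definition above) =====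
theorem generar_serie_spec : Claim_equal_generar_serie := by
  intro n _
  show generar_serie n = generar_serie_alt n
  unfold generar_serie generar_serie_alt
  rw [pyRange_toNat, foldA_eq]
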